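-- pv_equiv track=rewrite | github.com/dkarthicks27/ML_Database | hackerRank/strictly increasing faster.py | strictlyIncreasing
-- ===== SOURCE A (Python) =====
-- def strictlyIncreasing(arr):
--     seen = set()
--     dups = set()
--     count = 0
--     for i in arr:
--         if i not in seen:
--             seen.add(i)
--         else:
--             dups.add(i)
--             count += 1
--
--     return seen, count, dups
-- ===== SOURCE B (Python) =====
-- def strictlyIncreasing(arr):
--     # Stateless nested scan: no seen/dups/count state is maintained. An
--     # occurrence at position i is a repeat iff the value's first occurrence
--     # (a fresh linear scan, arr.index) is earlier; the three results are then
--     # mere aggregations (set / len / set) of two comprehensions.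
--     reps = [x for i, x in enumerate(arr) if arr.index(x) < i]
--     uniq = [x for i, x in enumerate(arr) if arr.index(x) == i]
--     return set(uniq), len(reps), set(reps)
-- ===== Notes on version B (the rewrite author's own statement) =====
-- stated objective: alternative
-- what changed: B maintains no state at all: it classifies each occurrence by a fresh linear scan for the value's first occurrence (arr.index(x) < i) in two comprehensions and aggregates afterwards (set/len/set), instead of A's single loop that incrementally maintains seen/dups/count hash sets; B trades the hash sets for repeated scans, so it is quadratic where A is linear.
import Mathlib
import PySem

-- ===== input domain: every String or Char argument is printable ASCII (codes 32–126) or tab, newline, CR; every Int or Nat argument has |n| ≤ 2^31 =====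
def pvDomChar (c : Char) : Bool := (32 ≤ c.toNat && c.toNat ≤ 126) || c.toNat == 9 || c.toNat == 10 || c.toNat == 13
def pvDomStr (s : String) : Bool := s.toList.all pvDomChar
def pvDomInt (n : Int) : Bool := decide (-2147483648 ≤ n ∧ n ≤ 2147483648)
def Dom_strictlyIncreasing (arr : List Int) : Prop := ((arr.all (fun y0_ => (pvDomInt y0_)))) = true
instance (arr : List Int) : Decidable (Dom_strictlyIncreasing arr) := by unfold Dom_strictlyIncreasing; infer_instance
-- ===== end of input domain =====

-- B replaces A's stateful loop (incrementally maintained seen/dups/count hash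
-- sets) by two stateless first-occurrence-scan comprehensions plus aggregation
-- (set/len/set) — an alternative decomposition; B is quadratic, A linear.

-- ===== PORT A =====
def strictlyIncreasing (arr : List Int) : List Int × Int × List Int :=
  let st := arr.foldl
    (fun (st : PySem.Set Int × PySem.Set Int × Int) i =>
      if ¬ (PySem.Set.contains st.1 i = true) then
        (PySem.Set.add st.1 i, st.2.1, st.2.2)
      else
        (st.1, PySem.Set.add st.2.1 i, st.2.2 + 1))
    (PySem.Set.empty, PySem.Set.empty, 0)
  (st.1, st.2.2, st.2.1)

-- ===== PORT B =====
def strictlyIncreasing_alt (arr : List Int) : List Int × Int × List Int :=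
  -- arr.index(x): x is drawn from arr itself, so index? is never none; the
  -- none branch (Python's ValueError) is unreachable.
  let reps : List Int :=
    ((PySem.List.enumerate arr).filter
      (fun p => match PySem.List.index? arr p.2 with
        | some k => decide ((k : Int) < p.1)
        | none => false)).map (fun p => p.2)
  let uniq : List Int :=
    ((PySem.List.enumerate arr).filter
      (fun p => match PySem.List.index? arr p.2 with
        | some k => decide ((k : Int) = p.1)
        | none => false)).map (fun p => p.2)
  (PySem.Set.ofList uniq, (reps.length : Int), PySem.Set.ofList reps)

-- ===== PRECONDITION & SPEC =====
def Spec_strictlyIncreasing (arr : List Int) (out : List Int × Int × List Int) : Prop := out = strictlyIncreasing_alt arr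
instance (arr : List Int) (out : List Int × Int × List Int) : Decidable (Spec_strictlyIncreasing arr out) := by unfold Spec_strictlyIncreasing; infer_instance

-- ===== CLAIM (what is proved, stated in full; the proofs are below) =====
def Claim_equal_strictlyIncreasing : Prop := ∀ (arr : List Int), Dom_strictlyIncreasing arr → Spec_strictlyIncreasing arr (strictlyIncreasing arr)

-- ===== LEMMAS AND PROOFS =====

/-- The repeat occurrences of a list (each element that already occurred before it),
given the set `s` of values seen earlier. -/
def repAux (s : PySem.Set Int) : List Int → List Int
  | [] => []
  | x :: xs => (if PySem.Set.contains s x then [x] else []) ++ repAux (PySem.Set.add s x) xs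

/-- The first occurrences of a list, given the set `s` of values seen earlier. -/
def uniqAux (s : PySem.Set Int) : List Int → List Int
  | [] => []
  | x :: xs => (if PySem.Set.contains s x then [] else [x]) ++ uniqAux (PySem.Set.add s x) xs

theorem foldA_eq (l : List Int) : ∀ (s d : PySem.Set Int) (c : Int),
    l.foldl
      (fun (st : PySem.Set Int × PySem.Set Int × Int) i =>
        if ¬ (PySem.Set.contains st.1 i = true) then
          (PySem.Set.add st.1 i, st.2.1, st.2.2)
        else
          (st.1, PySem.Set.add st.2.1 i, st.2.2 + 1))
      (s, d, c)
    = (PySem.Set.update s l, PySem.Set.update d (repAux s l), c + (repAux s l).length) := by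
  induction l with
  | nil => intro s d c; simp [PySem.Set.update_nil, repAux]
  | cons x xs ih =>
    intro s d c
    by_cases hxm : x ∈ s
    · have hx : PySem.Set.contains s x = true := (PySem.Set.contains_iff s x).mpr hxm
      have hadd : PySem.Set.add s x = s := PySem.Set.add_of_mem hxm
      rw [List.foldl_cons, if_neg (show ¬¬((s, d, c).1.contains x = true) by simp [hxm]), ih]
      simp only [repAux, if_pos hx, List.singleton_append, hadd, PySem.Set.update_cons,
        List.length_cons, Prod.mk.injEq, true_and]
      omega
    · have hx : ¬ (PySem.Set.contains s x = true) :=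
        fun h => hxm ((PySem.Set.contains_iff s x).mp h)
      rw [List.foldl_cons, if_pos (show ¬((s, d, c).1.contains x = true) from hx), ih]
      simp only [repAux, if_neg hx, List.nil_append, PySem.Set.update_cons]

/-- B's repeat comprehension over the remaining suffix equals `repAux` on the
prefix already scanned. -/
theorem reps_eq (arr : List Int) : ∀ (rest pre : List Int), arr = pre ++ rest →
    (List.map (fun p => p.2)
        (List.filter (fun p => match PySem.List.index? arr p.2 with
            | some k => decide ((k : Int) < p.1)
            | none => false)
          (PySem.List.enumerate rest (pre.length : Int))))
      = repAux (PySem.Set.ofList pre) rest := by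
  intro rest
  induction rest with
  | nil => intro pre h; simp [PySem.List.enumerate_nil, repAux]
  | cons x xs ih =>
    intro pre harr
    rw [PySem.List.enumerate_cons, List.filter_cons]
    have ih' := ih (pre ++ [x]) (by rw [harr]; simp)
    rw [PySem.Set.ofList_append_singleton] at ih'
    have hlen : (((pre ++ [x]).length : Nat) : Int) = (pre.length : Int) + 1 := by simp
    rw [hlen] at ih'
    by_cases hmem : x ∈ pre
    · obtain ⟨j, hj⟩ : ∃ j, PySem.List.index? pre x = some j :=
        Option.isSome_iff_exists.mp ((PySem.List.index?_isSome_iff pre x).mpr hmem)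
      have hidx : PySem.List.index? arr x = some j := by
        rw [harr, PySem.List.index?_append_of_mem _ hmem, hj]
      obtain ⟨a, b, hpre, halen, -⟩ := (PySem.List.index?_eq_some_iff pre x j).mp hj
      have hjlt : j < pre.length := by subst hpre; simp at halen ⊢; omega
      rw [if_pos (by simp only [hidx]; exact decide_eq_true (by exact_mod_cast hjlt)),
        List.map_cons, ih']
      simp [repAux, hmem]
    · have hidx : PySem.List.index? arr x = some pre.length :=
        (PySem.List.index?_eq_some_iff arr x pre.length).mpr ⟨pre, xs, harr, rfl, hmem⟩
      rw [if_neg (by simp only [hidx]; simp)]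
      rw [ih']
      simp [repAux, hmem]

/-- B's first-occurrence comprehension over the remaining suffix equals `uniqAux`. -/
theorem uniq_eq (arr : List Int) : ∀ (rest pre : List Int), arr = pre ++ rest →
    (List.map (fun p => p.2)
        (List.filter (fun p => match PySem.List.index? arr p.2 with
            | some k => decide ((k : Int) = p.1)
            | none => false)
          (PySem.List.enumerate rest (pre.length : Int))))
      = uniqAux (PySem.Set.ofList pre) rest := by
  intro rest
  induction rest with
  | nil => intro pre h; simp [PySem.List.enumerate_nil, uniqAux]
  | cons x xs ih =>
    intro pre harr
    rw [PySem.List.enumerate_cons, List.filter_cons]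
    have ih' := ih (pre ++ [x]) (by rw [harr]; simp)
    rw [PySem.Set.ofList_append_singleton] at ih'
    have hlen : (((pre ++ [x]).length : Nat) : Int) = (pre.length : Int) + 1 := by simp
    rw [hlen] at ih'
    by_cases hmem : x ∈ pre
    · obtain ⟨j, hj⟩ : ∃ j, PySem.List.index? pre x = some j :=
        Option.isSome_iff_exists.mp ((PySem.List.index?_isSome_iff pre x).mpr hmem)
      have hidx : PySem.List.index? arr x = some j := by
        rw [harr, PySem.List.index?_append_of_mem _ hmem, hj]
      obtain ⟨a, b, hpre, halen, -⟩ := (PySem.List.index?_eq_some_iff pre x j).mp hj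
      have hjlt : j < pre.length := by subst hpre; simp at halen ⊢; omega
      rw [if_neg (by simp only [hidx]; simp; exact_mod_cast Nat.ne_of_lt hjlt), ih']
      simp [uniqAux, hmem]
    · have hidx : PySem.List.index? arr x = some pre.length :=
        (PySem.List.index?_eq_some_iff arr x pre.length).mpr ⟨pre, xs, harr, rfl, hmem⟩
      rw [if_pos (by simp only [hidx]; simp), List.map_cons, ih']
      simp [uniqAux, hmem]

/-- `uniqAux s l` lists exactly the elements `Set.update s l` appends to `s`. -/
theorem update_eq_append_uniqAux (l : List Int) : ∀ (s : PySem.Set Int),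
    PySem.Set.update s l = s ++ uniqAux s l := by
  induction l with
  | nil => intro s; simp [PySem.Set.update_nil, uniqAux]
  | cons x xs ih =>
    intro s
    rw [PySem.Set.update_cons]
    by_cases hmem : x ∈ s
    · have hc : PySem.Set.contains s x = true := (PySem.Set.contains_iff s x).mpr hmem
      rw [PySem.Set.add_of_mem hmem, ih s]
      simp [uniqAux, hmem]
    · rw [PySem.Set.add_of_not_mem hmem, ih (s ++ [x])]
      simp [uniqAux, hmem]

/-- Re-collecting a nodup list as a set is the identity. -/
theorem update_of_nodup (l : List Int) : ∀ (s : PySem.Set Int),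
    l.Nodup → (∀ x ∈ l, x ∉ s) → PySem.Set.update s l = s ++ l := by
  induction l with
  | nil => intro s _ _; simp [PySem.Set.update_nil]
  | cons x xs ih =>
    intro s hnd hdisj
    rw [PySem.Set.update_cons,
      PySem.Set.add_of_not_mem (hdisj x (List.mem_cons_self)),
      ih (s ++ [x]) hnd.of_cons]
    · simp
    · intro y hy
      simp only [List.mem_append, List.mem_singleton]
      rintro (h | rfl)
      · exact hdisj y (List.mem_cons_of_mem _ hy) h
      · exact (List.nodup_cons.mp hnd).1 hy

theorem ofList_idem (l : List Int) :
    PySem.Set.ofList (PySem.Set.ofList l) = PySem.Set.ofList l := by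
  have h := update_of_nodup (PySem.Set.ofList l) PySem.Set.empty
    (PySem.Set.nodup_ofList l) (by intro x _ hx; simp [PySem.Set.empty] at hx)
  simp only [PySem.Set.update_nil_left, PySem.Set.empty, List.nil_append] at h
  exact h

-- ===== VERDICT (by name: the statement is the Claim_ definition above) =====
theorem strictlyIncreasing_spec : Claim_equal_strictlyIncreasing := by
  intro arr _
  unfold Spec_strictlyIncreasing
  simp only [strictlyIncreasing, strictlyIncreasing_alt]
  rw [foldA_eq arr PySem.Set.empty PySem.Set.empty 0]
  have hr := reps_eq arr arr [] (by simp)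
  have hu := uniq_eq arr arr [] (by simp)
  simp only [List.length_nil, Nat.cast_zero] at hr hu
  rw [hr, hu]
  have huniq : uniqAux (PySem.Set.ofList ([] : List Int)) arr = PySem.Set.ofList arr := by
    have h := update_eq_append_uniqAux arr PySem.Set.empty
    simp only [PySem.Set.update_nil_left, PySem.Set.empty, List.nil_append] at h
    exact h.symm
  rw [huniq, ofList_idem]
  simp [PySem.Set.empty, PySem.Set.update_nil_left, PySem.Set.ofList_nil]
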